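-- pv_equiv track=rewrite | github.com/SunenaB3504/CTET-Study | extract_questions.py | contains_english_words
-- ===== SOURCE A (Python) =====
-- def contains_english_words(text):
--     """Check if text contains common English words"""
--     english_indicators = [
--         'the', 'and', 'or', 'but', 'in', 'on', 'at', 'to', 'for', 'of', 'with', 'by',
--         'what', 'which', 'how', 'why', 'when', 'where', 'who', 'does', 'are', 'is',
--         'this', 'that', 'will', 'can', 'should', 'would', 'could', 'have', 'has'
--     ]
--     text_lower = text.lower()
--     return any(word in text_lower for word in english_indicators)
-- ===== SOURCE B (Python) =====
-- _BY_FIRST = {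
--     'a': ('nd', 't', 're'),
--     'b': ('ut', 'y'),
--     'c': ('an', 'ould'),
--     'd': ('oes',),
--     'f': ('or',),
--     'h': ('ow', 'as', 'ave'),
--     'i': ('n', 's'),
--     'o': ('r', 'n', 'f'),
--     's': ('hould',),
--     't': ('he', 'o', 'his', 'hat'),
--     'w': ('ith', 'hat', 'hich', 'hy', 'hen', 'here', 'ho', 'ill', 'ould'),
-- }
--
--
-- def contains_english_words(text):
--     """Single left-to-right scan with a first-letter dispatch table: at each
--     position look up the current character and only test the few candidate
--     word tails starting with that letter."""
--     t = text.lower()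
--     for i, ch in enumerate(t):
--         for tail in _BY_FIRST.get(ch, ()):
--             if t.startswith(tail, i + 1):
--                 return True
--     return False
-- ===== Notes on version B (the rewrite author's own statement) =====
-- stated objective: alternative
-- what changed: Replaces A's 31 independent full-text substring scans by a single left-to-right scan of the lowered text with a first-letter dispatch table (the words indexed by their first character), so at each position only the few tails whose first letter matches are prefix-tested.
import Mathlib
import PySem

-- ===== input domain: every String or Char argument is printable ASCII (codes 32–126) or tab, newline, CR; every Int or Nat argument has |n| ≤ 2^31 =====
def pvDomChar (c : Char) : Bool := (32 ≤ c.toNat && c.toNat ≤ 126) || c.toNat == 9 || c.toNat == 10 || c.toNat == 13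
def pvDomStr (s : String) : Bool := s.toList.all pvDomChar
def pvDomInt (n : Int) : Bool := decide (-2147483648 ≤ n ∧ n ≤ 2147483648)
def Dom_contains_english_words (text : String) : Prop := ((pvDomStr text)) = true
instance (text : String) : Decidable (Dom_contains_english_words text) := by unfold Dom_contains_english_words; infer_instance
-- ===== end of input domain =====

-- B replaces A's 31 independent 'word in text' substring scans by one left-to-right scan of
-- the lowered text with a first-letter dispatch table (words indexed by first character);
-- at each position only the tails whose first letter matches are prefix-tested (alternative).

-- ===== PORT A =====
def pvWordsA : List String :=
  ["the", "and", "or", "but", "in", "on", "at", "to", "for", "of", "with", "by",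
   "what", "which", "how", "why", "when", "where", "who", "does", "are", "is",
   "this", "that", "will", "can", "should", "would", "could", "have", "has"]

def contains_english_words (text : String) : Bool :=
  let text_lower := PySem.Str.lower text
  pvWordsA.any (fun word => PySem.Str.isIn word text_lower)

-- ===== PORT B =====
-- the dict _BY_FIRST: lookup with default () becomes a total function with default []
def pvTailsFor : Char → List (List Char)
  | 'a' => [['n','d'], ['t'], ['r','e']]
  | 'b' => [['u','t'], ['y']]
  | 'c' => [['a','n'], ['o','u','l','d']]
  | 'd' => [['o','e','s']]
  | 'f' => [['o','r']]
  | 'h' => [['o','w'], ['a','s'], ['a','v','e']]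
  | 'i' => [['n'], ['s']]
  | 'o' => [['r'], ['n'], ['f']]
  | 's' => [['h','o','u','l','d']]
  | 't' => [['h','e'], ['o'], ['h','i','s'], ['h','a','t']]
  | 'w' => [['i','t','h'], ['h','a','t'], ['h','i','c','h'], ['h','y'], ['h','e','n'],
            ['h','e','r','e'], ['h','o'], ['i','l','l'], ['o','u','l','d']]
  | _   => []

-- the `for i, ch in enumerate(t)` loop as structural recursion on the suffix;
-- `t.startswith(tail, i + 1)` is exactly: tail is a prefix of the rest after position i
def pvScanB : List Char → Bool
  | [] => false
  | c :: r => (pvTailsFor c).any (fun tail => PySem.Chars.startswith r tail) || pvScanB r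

def contains_english_words_alt (text : String) : Bool :=
  pvScanB (PySem.Str.lower text).toList

-- ===== PRECONDITION & SPEC =====
def Spec_contains_english_words (text : String) (out : Bool) : Prop := out = contains_english_words_alt text
instance (text : String) (out : Bool) : Decidable (Spec_contains_english_words text out) := by unfold Spec_contains_english_words; infer_instance

-- ===== CLAIM (what is proved, stated in full; the proofs are below) =====
def Claim_equal_contains_english_words : Prop := ∀ (text : String), Dom_contains_english_words text → Spec_contains_english_words text (contains_english_words text)

-- ===== LEMMAS AND PROOFS =====

-- A's words as concrete char lists
def pvWordsC : List (List Char) :=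
  [['t','h','e'], ['a','n','d'], ['o','r'], ['b','u','t'], ['i','n'], ['o','n'], ['a','t'],
   ['t','o'], ['f','o','r'], ['o','f'], ['w','i','t','h'], ['b','y'],
   ['w','h','a','t'], ['w','h','i','c','h'], ['h','o','w'], ['w','h','y'], ['w','h','e','n'],
   ['w','h','e','r','e'], ['w','h','o'], ['d','o','e','s'], ['a','r','e'], ['i','s'],
   ['t','h','i','s'], ['t','h','a','t'], ['w','i','l','l'], ['c','a','n'],
   ['s','h','o','u','l','d'], ['w','o','u','l','d'], ['c','o','u','l','d'],
   ['h','a','v','e'], ['h','a','s']]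

lemma pv_wordsA_toList : pvWordsA.map String.toList = pvWordsC := by decide

-- dispatch is sound: every tail listed under c, with c prepended, is one of A's words
lemma pv_tailsFor_mem (c : Char) (rem : List Char) (h : rem ∈ pvTailsFor c) :
    c :: rem ∈ pvWordsC := by
  unfold pvTailsFor at h
  split at h <;> first
    | exact absurd h (List.not_mem_nil)
    | (fin_cases h <;> decide)

-- dispatch is complete: every word of A, split as head :: tail, has its tail under its head
lemma pv_wordsC_split (w : List Char) (hw : w ∈ pvWordsC) (c : Char) (r : List Char)
    (hpre : w <+: c :: r) : ∃ rem ∈ pvTailsFor c, rem <+: r := by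
  fin_cases hw <;>
    · rw [List.cons_prefix_cons] at hpre
      obtain ⟨rfl, h2⟩ := hpre
      exact ⟨_, by decide, h2⟩

-- one position of B's scan tests exactly "some word of A starts here"
lemma pv_pos (c : Char) (r : List Char) :
    ((pvTailsFor c).any (fun tail => PySem.Chars.startswith r tail) = true)
      ↔ ∃ w ∈ pvWordsC, w <+: c :: r := by
  simp only [List.any_eq_true, PySem.Chars.startswith_iff]
  constructor
  · rintro ⟨rem, hmem, hpre⟩
    exact ⟨c :: rem, pv_tailsFor_mem c rem hmem, List.cons_prefix_cons.mpr ⟨rfl, hpre⟩⟩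
  · rintro ⟨w, hw, hpre⟩
    obtain ⟨rem, hmem, h2⟩ := pv_wordsC_split w hw c r hpre
    exact ⟨rem, hmem, h2⟩

-- B's whole scan tests exactly "some word of A starts at some position"
lemma pv_scan_iff (l : List Char) :
    pvScanB l = true ↔ ∃ w ∈ pvWordsC, ∃ j, w <+: l.drop j := by
  induction l with
  | nil =>
    simp only [pvScanB, List.drop_nil, List.prefix_nil]
    constructor
    · intro h; cases h
    · rintro ⟨w, hw, _, rfl⟩; revert hw; decide
  | cons c r ih =>
    simp only [pvScanB, Bool.or_eq_true, ih, pv_pos]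
    constructor
    · rintro (⟨w, hw, hpre⟩ | ⟨w, hw, j, hpre⟩)
      · exact ⟨w, hw, 0, by simpa using hpre⟩
      · exact ⟨w, hw, j + 1, by simpa using hpre⟩
    · rintro ⟨w, hw, j, hpre⟩
      cases j with
      | zero => exact Or.inl ⟨w, hw, by simpa using hpre⟩
      | succ j => exact Or.inr ⟨w, hw, j, by simpa using hpre⟩

-- ===== VERDICT (by name: the statement is the Claim_ definition above) =====
theorem contains_english_words_spec : Claim_equal_contains_english_words := by
  intro text _
  unfold Spec_contains_english_words contains_english_words contains_english_words_alt
  rw [Bool.eq_iff_iff]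
  simp only [List.any_eq_true, PySem.Str.isIn_eq, pv_scan_iff]
  rw [← pv_wordsA_toList]
  simp only [List.mem_map]
  constructor
  · rintro ⟨word, hmem, hIn⟩
    obtain ⟨j, hj⟩ := (PySem.Chars.exists_prefix_drop_iff_isIn _ _).mpr hIn
    exact ⟨word.toList, ⟨word, hmem, rfl⟩, j, hj⟩
  · rintro ⟨w, ⟨word, hmem, rfl⟩, j, hj⟩
    exact ⟨word, hmem, (PySem.Chars.exists_prefix_drop_iff_isIn _ _).mp ⟨j, hj⟩⟩
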